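-- pv_equiv track=rewrite | github.com/LEEAHRI/Algorithm | codility/2.py | solution
-- ===== SOURCE A (Python) =====
-- def solution(A):
--     # write your code in Python 3.6
--     ans = 0
--     B = sorted(A)
--     A_stack = []
--     B_stack = []
--
--
--     for n in range(len(A)):
--         A_stack.append(A[n])
--         B_stack.append(B[n])
--         if sorted(A_stack) != B_stack:
--             ans += 1
--         else:
--             continue
--     return len(A) - ans
-- ===== SOURCE B (Python) =====
-- def solution(A):
--     # One pass with prefix maxima vs suffix minima instead of re-sorting every prefix.
--     if not A:
--         return 0
--     rest = A[1:]
--     suf = []            # suf[j] = min(rest[j:]) built back-to-front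
--     m = None
--     for x in reversed(rest):
--         m = x if m is None or x < m else m
--         suf.append(m)
--     suf.reverse()
--     ans = 1             # the full prefix always matches
--     mx = A[0]
--     for x, s in zip(rest, suf):
--         if mx <= s:
--             ans += 1
--         mx = mx if mx >= x else x
--     return ans
-- ===== Notes on version B (the rewrite author's own statement) =====
-- stated objective: faster
-- what changed: Replaced re-sorting every prefix and comparing it with the sorted array's prefix by a single pass comparing running prefix maxima with precomputed suffix minima.
import Mathlib
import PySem

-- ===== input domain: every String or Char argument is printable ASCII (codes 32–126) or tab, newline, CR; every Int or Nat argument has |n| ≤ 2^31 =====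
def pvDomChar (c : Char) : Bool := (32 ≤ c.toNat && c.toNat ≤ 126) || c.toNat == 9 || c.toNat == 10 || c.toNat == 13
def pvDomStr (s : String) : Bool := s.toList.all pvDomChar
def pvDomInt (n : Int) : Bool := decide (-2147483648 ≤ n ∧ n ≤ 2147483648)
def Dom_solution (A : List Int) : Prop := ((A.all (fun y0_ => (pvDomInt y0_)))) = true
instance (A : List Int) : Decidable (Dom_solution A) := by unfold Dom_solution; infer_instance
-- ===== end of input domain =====

-- B replaces A's re-sorting of every prefix by a single pass comparing running
-- prefix maxima with precomputed suffix minima (objective: faster).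

-- ===== PORT A =====
def solution (A : List Int) : Int :=
  let B := PySem.List.sorted A (fun x => x) false
  let st := (PySem.List.pyRange 0 (A.length : Int) 1).foldl
    (fun (s : Int × List Int × List Int) n =>
      let Astack := s.2.1 ++ [PySem.List.pyGetD A n 0]
      let Bstack := s.2.2 ++ [PySem.List.pyGetD B n 0]
      if PySem.List.sorted Astack (fun x => x) false ≠ Bstack
      then (s.1 + 1, Astack, Bstack)
      else (s.1, Astack, Bstack))
    ((0 : Int), ([] : List Int), ([] : List Int))
  (A.length : Int) - st.1

-- ===== PORT B =====
def solution_alt (A : List Int) : Int :=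
  match A with
  | [] => 0
  | a :: rest =>
    -- suf[j] = min(rest[j:]), built back-to-front and reversed (Source B's first loop)
    let sufRev := rest.reverse.foldl
      (fun (s : List Int × Option Int) x =>
        let m := match s.2 with
          | none => x
          | some m0 => if x < m0 then x else m0
        (s.1 ++ [m], some m))
      (([] : List Int), (none : Option Int))
    let suf := sufRev.1.reverse
    -- one forward pass: running prefix max vs suffix min (Source B's second loop)
    let st := (rest.zip suf).foldl
      (fun (s : Int × Int) (p : Int × Int) =>
        let ans := if s.2 ≤ p.2 then s.1 + 1 else s.1
        (ans, if s.2 ≥ p.1 then s.2 else p.1))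
      ((1 : Int), a)
    st.1


-- ===== PRECONDITION & SPEC =====
def Spec_solution (A : List Int) (out : Int) : Prop := out = solution_alt A
instance (A : List Int) (out : Int) : Decidable (Spec_solution A out) := by unfold Spec_solution; infer_instance

-- ===== CLAIM (what is proved, stated in full; the proofs are below) =====
def Claim_equal_solution : Prop := ∀ (A : List Int), Dom_solution A → Spec_solution A (solution A)

-- ===== LEMMAS AND PROOFS =====

-- common specification both ports are reduced to: the number of k < len A such that
-- every element of A[:k+1] is ≤ every element of A[k+1:]
def goodB (A : List Int) (k : Nat) : Bool :=
  (A.take (k+1)).all (fun x => (A.drop (k+1)).all (fun y => decide (x ≤ y)))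

def specN (A : List Int) : Int := ((List.range A.length).countP (goodB A) : Int)

-- key mathematical fact: a prefix of A sorts to the corresponding prefix of sorted A
-- iff every prefix element is ≤ every suffix element
theorem key_iff (A : List Int) (k : Nat) :
    (PySem.List.sorted (A.take k) (fun x => x) false
      = (PySem.List.sorted A (fun x => x) false).take k)
    ↔ (∀ x ∈ A.take k, ∀ y ∈ A.drop k, x ≤ y) := by
  set S := PySem.List.sorted A (fun x => x) false with hS
  constructor
  · intro h x hx y hy
    have hpermS : S.Perm A := PySem.List.sorted_perm A _ false
    have hpermT : (S.take k).Perm (A.take k) := by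
      rw [← h]; exact PySem.List.sorted_perm _ _ false
    have hpermD : (S.drop k).Perm (A.drop k) := by
      rw [← Multiset.coe_eq_coe]
      have h1 : (↑(S.take k) + ↑(S.drop k) : Multiset Int) = ↑(A.take k) + ↑(A.drop k) := by
        have h0 : ((S.take k ++ S.drop k : List Int) : Multiset Int)
            = ((A.take k ++ A.drop k : List Int) : Multiset Int) := by
          simp only [List.take_append_drop]
          exact Multiset.coe_eq_coe.mpr hpermS
        simpa using h0
      have h2 : (↑(S.take k) : Multiset Int) = ↑(A.take k) := Multiset.coe_eq_coe.mpr hpermT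
      rw [h2] at h1
      exact add_left_cancel h1
    have hpw : S.Pairwise (fun a b => a ≤ b) := by
      have := PySem.List.sorted_pairwise A (fun x => x)
      simpa using this
    have hsplit : (S.take k ++ S.drop k).Pairwise (fun a b => a ≤ b) := by
      rw [List.take_append_drop]; exact hpw
    have hcross := (List.pairwise_append.mp hsplit).2.2
    exact hcross x (hpermT.mem_iff.mpr hx) y (hpermD.mem_iff.mpr hy)
  · intro h
    set P1 := PySem.List.sorted (A.take k) (fun x => x) false with hP1
    set P2 := PySem.List.sorted (A.drop k) (fun x => x) false with hP2
    have hperm : (P1 ++ P2).Perm A := by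
      have := (PySem.List.sorted_perm (A.take k) (fun x => x) false).append
        (PySem.List.sorted_perm (A.drop k) (fun x => x) false)
      simpa [List.take_append_drop] using this
    have hpw : (P1 ++ P2).Pairwise (fun a b => a ≤ b) := by
      rw [List.pairwise_append]
      refine ⟨by simpa using PySem.List.sorted_pairwise (A.take k) (fun x => x),
             by simpa using PySem.List.sorted_pairwise (A.drop k) (fun x => x), ?_⟩
      intro x hx y hy
      exact h x ((PySem.List.mem_sorted _ _ _ _).mp hx) y ((PySem.List.mem_sorted _ _ _ _).mp hy)
    have hSeq : S = P1 ++ P2 := PySem.List.sorted_id_eq_of_perm_of_pairwise A (P1 ++ P2) hperm hpw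
    by_cases hk : k ≤ A.length
    · have hlen : P1.length = k := by
        rw [hP1, PySem.List.length_sorted, List.length_take]; omega
      rw [hSeq, ← hlen, List.take_left]
    · have hAtake : A.take k = A := List.take_of_length_le (by omega)
      have hP2nil : P2 = [] := by
        rw [hP2, PySem.List.sorted_eq_nil_iff, List.drop_eq_nil_iff]; omega
      have hSlen : S.length = A.length := by rw [hS, PySem.List.length_sorted]
      rw [hSeq, hP2nil, List.append_nil, List.take_of_length_le (by rw [hP1, PySem.List.length_sorted, hAtake]; omega)]

-- A-side fold invariant: state after n steps is (n - matches so far, A[:n], sorted(A)[:n])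
theorem Afold (A : List Int) (n : Nat) (h : n ≤ A.length) :
    (List.range n).foldl
      (fun (s : Int × List Int × List Int) (k : Nat) =>
        let Astack := s.2.1 ++ [PySem.List.pyGetD A (k : Int) 0]
        let Bstack := s.2.2 ++ [PySem.List.pyGetD (PySem.List.sorted A (fun x => x) false) (k : Int) 0]
        if PySem.List.sorted Astack (fun x => x) false ≠ Bstack
        then (s.1 + 1, Astack, Bstack)
        else (s.1, Astack, Bstack))
      ((0 : Int), ([] : List Int), ([] : List Int))
    = ((n : Int) - ((List.range n).countP (fun k =>
          decide (PySem.List.sorted (A.take (k+1)) (fun x => x) false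
            = (PySem.List.sorted A (fun x => x) false).take (k+1))) : Int),
       A.take n, (PySem.List.sorted A (fun x => x) false).take n) := by
  induction n with
  | zero => simp
  | succ n ih =>
    have hn : n < A.length := by omega
    have hSlen : (PySem.List.sorted A (fun x => x) false).length = A.length :=
      PySem.List.length_sorted A _ false
    rw [List.range_succ, List.foldl_append, ih (by omega)]
    simp only [List.foldl_cons, List.foldl_nil]
    have hA : A.take n ++ [PySem.List.pyGetD A (n : Int) 0] = A.take (n+1) := by
      rw [PySem.List.pyGetD_natCast, List.getD_eq_getElem _ _ hn, List.take_add_one,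
        List.getElem?_eq_getElem hn]
      rfl
    have hB : (PySem.List.sorted A (fun x => x) false).take n
        ++ [PySem.List.pyGetD (PySem.List.sorted A (fun x => x) false) (n : Int) 0]
        = (PySem.List.sorted A (fun x => x) false).take (n+1) := by
      rw [PySem.List.pyGetD_natCast, List.getD_eq_getElem _ _ (by omega), List.take_add_one,
        List.getElem?_eq_getElem (by omega)]
      rfl
    simp only [hA, hB]
    rw [List.countP_append]
    by_cases hp : PySem.List.sorted (A.take (n+1)) (fun x => x) false
        = (PySem.List.sorted A (fun x => x) false).take (n+1)
    · simp [hp]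
    · simp [hp]
      ring

-- B-side helpers: suffix minima and the counting loop
def sufMins : List Int → List Int
  | [] => []
  | x :: xs => (xs.foldl min x) :: sufMins xs

def countB (mx : Int) : List Int → Int
  | [] => 0
  | x :: xs => (if mx ≤ xs.foldl min x then 1 else 0) + countB (max mx x) xs

theorem foldl_min_comm (ys : List Int) : ∀ (a b : Int), min a (ys.foldl min b) = ys.foldl min (min a b) := by
  induction ys with
  | nil => intro a b; rfl
  | cons c cs ih =>
    intro a b
    simp only [List.foldl_cons]
    rw [ih a (min b c), min_assoc]

theorem le_foldl_min_iff (mx x : Int) (t : List Int) :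
    mx ≤ t.foldl min x ↔ (∀ v ∈ x :: t, mx ≤ v) := by
  constructor
  · intro h v hv
    rcases List.mem_cons.mp hv with rfl | hv
    · exact le_trans h (PySem.List.foldl_min_le t v).1
    · exact le_trans h ((PySem.List.foldl_min_le t x).2 v hv)
  · intro h
    rcases PySem.List.foldl_min_mem t x with he | he
    · rw [he]; exact h x (List.mem_cons_self ..)
    · exact h _ (List.mem_cons_of_mem _ he)

theorem Bfold1 (xs : List Int) :
    xs.reverse.foldl
      (fun (s : List Int × Option Int) x =>
        let m := match s.2 with
          | none => x
          | some m0 => if x < m0 then x else m0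
        (s.1 ++ [m], some m))
      (([] : List Int), (none : Option Int))
    = ((sufMins xs).reverse, (sufMins xs).head?) := by
  induction xs with
  | nil => rfl
  | cons x t ih =>
    rw [List.reverse_cons, List.foldl_append, ih]
    simp only [List.foldl_cons, List.foldl_nil]
    cases t with
    | nil => rfl
    | cons y ys =>
      simp only [sufMins, List.head?_cons, List.reverse_cons, List.foldl_cons]
      have hm : (if x < ys.foldl min y then x else ys.foldl min y) = ys.foldl min (min x y) := by
        rw [← foldl_min_comm, min_def]
        split_ifs with h1 h2 h2 <;> omega
      rw [hm]

theorem Bfold2 (xs : List Int) : ∀ (c mx : Int),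
    ((xs.zip (sufMins xs)).foldl
      (fun (s : Int × Int) (p : Int × Int) =>
        let ans := if s.2 ≤ p.2 then s.1 + 1 else s.1
        (ans, if s.2 ≥ p.1 then s.2 else p.1))
      (c, mx)).1 = c + countB mx xs := by
  induction xs with
  | nil => intro c mx; simp [countB]
  | cons x t ih =>
    intro c mx
    simp only [sufMins, List.zip_cons_cons, List.foldl_cons, countB]
    have hmx : (if mx ≥ x then mx else x) = max mx x := by
      rw [max_def]; split_ifs <;> omega
    rw [hmx, ih]
    split_ifs <;> ring

theorem Bcount (xs : List Int) : ∀ (mx : Int),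
    countB mx xs = (((List.range xs.length).countP
      (fun j => decide (∀ u ∈ mx :: xs.take j, ∀ v ∈ xs.drop j, u ≤ v))) : Int) := by
  induction xs with
  | nil => intro mx; simp [countB]
  | cons x t ih =>
    intro mx
    simp only [countB, List.length_cons, List.range_succ_eq_map, List.countP_cons, List.countP_map]
    have hstep : List.countP ((fun j => decide (∀ u ∈ mx :: (x :: t).take j, ∀ v ∈ (x :: t).drop j, u ≤ v)) ∘ Nat.succ) (List.range t.length)
        = List.countP (fun j => decide (∀ u ∈ max mx x :: t.take j, ∀ v ∈ t.drop j, u ≤ v)) (List.range t.length) := by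
      apply List.countP_congr
      intro j hj
      simp only [Function.comp_apply, Nat.succ_eq_add_one, List.take_succ_cons, List.drop_succ_cons,
        decide_eq_true_eq]
      constructor
      · intro h u hu v hv
        rcases List.mem_cons.mp hu with rfl | hu
        · exact max_le_iff.mpr ⟨h mx (by simp) v hv, h x (by simp) v hv⟩
        · exact h u (by simp [hu]) v hv
      · intro h u hu v hv
        rcases List.mem_cons.mp hu with rfl | hu
        · exact le_trans (le_max_left u x) (h _ (by simp) v hv)
        · rcases List.mem_cons.mp hu with rfl | hu
          · exact le_trans (le_max_right mx u) (h _ (by simp) v hv)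
          · exact h u (by simp [hu]) v hv
    rw [hstep, ih (max mx x)]
    have hp0 : (∀ u ∈ mx :: List.take 0 (x :: t), ∀ v ∈ List.drop 0 (x :: t), u ≤ v)
        ↔ mx ≤ t.foldl min x := by
      rw [le_foldl_min_iff]
      simp
    rw [decide_eq_decide.mpr hp0]
    by_cases hc : mx ≤ t.foldl min x
    · rw [if_pos hc, if_pos (decide_eq_true hc)]
      push_cast
      ring
    · rw [if_neg hc, if_neg (by simpa using hc)]
      push_cast
      ring

theorem solution_eq_specN (A : List Int) : solution A = specN A := by
  simp only [solution]
  rw [PySem.List.pyRange_zero_natCast, List.foldl_map, Afold A A.length le_rfl]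
  have hc : (List.range A.length).countP (fun k =>
      decide (PySem.List.sorted (A.take (k+1)) (fun x => x) false
        = (PySem.List.sorted A (fun x => x) false).take (k+1)))
      = (List.range A.length).countP (goodB A) := by
    apply List.countP_congr
    intro k _
    simp only [goodB, List.all_eq_true, decide_eq_true_eq]
    exact key_iff A (k+1)
  unfold specN
  rw [hc]
  ring

theorem solution_alt_eq_specN (A : List Int) : solution_alt A = specN A := by
  cases A with
  | nil => rfl
  | cons a rest =>
    simp only [solution_alt]
    rw [Bfold1 rest, List.reverse_reverse, Bfold2 rest 1 a, Bcount rest a]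
    unfold specN
    simp only [List.length_cons, List.range_succ, List.countP_append]
    have hlast : List.countP (goodB (a :: rest)) [rest.length] = 1 := by
      simp [goodB, List.drop_succ_cons]
    have hcong : List.countP (goodB (a :: rest)) (List.range rest.length)
        = List.countP (fun j => decide (∀ u ∈ a :: rest.take j, ∀ v ∈ rest.drop j, u ≤ v))
            (List.range rest.length) := by
      apply List.countP_congr
      intro j _
      simp [goodB, List.all_eq_true, List.take_succ_cons, List.drop_succ_cons]
    rw [hlast, hcong]
    push_cast
    ring

-- ===== VERDICT (by name: the statement is the Claim_ definition above) =====
theorem solution_spec : Claim_equal_solution := by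
  intro A _
  unfold Spec_solution
  rw [solution_eq_specN, solution_alt_eq_specN]
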